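-- pv_equiv track=rewrite | github.com/lucas-rx/wordle | src/app.py | cinqPositifsConsecutifs
-- ===== SOURCE A (Python) =====
-- def cinqPositifsConsecutifs(liste) :
--     c = 0
--     for i in range(len(liste)) :
--         if liste[i] >= 0 :
--             c += 1
--         else :
--             c = 0
--         if c == 5 :
--             return True
--     return False
-- ===== SOURCE B (Python) =====
-- def cinqPositifsConsecutifs(liste):
--     for i in range(len(liste) - 4):
--         if all(x >= 0 for x in liste[i:i+5]):
--             return True
--     return False
-- ===== Notes on version B (the rewrite author's own statement) =====
-- stated objective: alternative
-- what changed: Replaced the running-counter-with-reset accumulator by a sliding-window scan that returns True as soon as some length-5 slice is entirely non-negative.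
import Mathlib
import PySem

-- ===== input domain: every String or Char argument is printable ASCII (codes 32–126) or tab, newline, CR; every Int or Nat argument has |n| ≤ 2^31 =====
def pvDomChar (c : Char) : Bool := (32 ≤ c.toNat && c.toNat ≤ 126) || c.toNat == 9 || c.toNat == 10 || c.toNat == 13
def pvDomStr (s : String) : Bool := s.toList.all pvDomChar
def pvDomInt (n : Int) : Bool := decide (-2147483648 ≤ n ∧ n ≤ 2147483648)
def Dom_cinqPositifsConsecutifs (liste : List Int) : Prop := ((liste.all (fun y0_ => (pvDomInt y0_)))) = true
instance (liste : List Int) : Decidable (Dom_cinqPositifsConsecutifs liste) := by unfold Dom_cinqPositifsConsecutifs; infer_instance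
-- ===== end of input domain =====

-- B replaces A's running counter with a sliding 5-window scan: a different decomposition of the same O(n) task (objective: alternative).


-- ===== PORT A =====
-- loop over the list carrying Python's int counter c; early 'return True' becomes the 'if c' = 5' branch
def pvGoA : List Int → Int → Bool
  | [], _ => false
  | x :: xs, c =>
    let c' := if 0 ≤ x then c + 1 else 0
    if c' = 5 then true else pvGoA xs c'

def cinqPositifsConsecutifs (liste : List Int) : Bool := pvGoA liste 0

-- ===== PORT B =====
-- 'for i in range(len - 4)' as recursion on the tail; 'all(x >= 0 for x in liste[i:i+5])' as take 5 / all
def pvGoB : List Int → Bool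
  | [] => false
  | x :: xs =>
    if (x :: xs).length < 5 then false
    else if ((x :: xs).take 5).all (fun y => decide (0 ≤ y)) then true
    else pvGoB xs

def cinqPositifsConsecutifs_alt (liste : List Int) : Bool := pvGoB liste

-- ===== PRECONDITION & SPEC =====
def Spec_cinqPositifsConsecutifs (liste : List Int) (out : Bool) : Prop := out = cinqPositifsConsecutifs_alt liste
instance (liste : List Int) (out : Bool) : Decidable (Spec_cinqPositifsConsecutifs liste out) := by unfold Spec_cinqPositifsConsecutifs; infer_instance

-- ===== CLAIM (what is proved, stated in full; the proofs are below) =====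
def Claim_equal_cinqPositifsConsecutifs : Prop := ∀ (liste : List Int), Dom_cinqPositifsConsecutifs liste → Spec_cinqPositifsConsecutifs liste (cinqPositifsConsecutifs liste)

-- ===== LEMMAS AND PROOFS =====

theorem pvGoB_nil_short (xs : List Int) (h : xs.length < 5) : pvGoB xs = false := by
  cases xs with
  | nil => simp [pvGoB]
  | cons y ys =>
    simp only [pvGoB]
    rw [if_pos h]

theorem pvGoB_cons (x : Int) (xs : List Int) :
    pvGoB (x :: xs) = ((decide (5 ≤ (x :: xs).length) && ((x :: xs).take 5).all (fun y => decide (0 ≤ y))) || pvGoB xs) := by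
  by_cases h5 : (x :: xs).length < 5
  · have h5' : decide (5 ≤ (x :: xs).length) = false := by
      simp only [List.length_cons] at h5 ⊢; simp; omega
    have hxs : pvGoB xs = false := pvGoB_nil_short xs (by simp only [List.length_cons] at h5; omega)
    simp only [pvGoB, if_pos h5, h5', hxs, Bool.false_and, Bool.false_or]
  · have h5' : decide (5 ≤ (x :: xs).length) = true := by
      simp only [List.length_cons] at h5 ⊢; simp; omega
    simp only [pvGoB, if_neg h5, h5', Bool.true_and]
    cases hall : ((x :: xs).take 5).all (fun y => decide (0 ≤ y)) with
    | true => simp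
    | false => simp

-- the window-at-0 test of any list is absorbed by pvGoB of that list
theorem pvGoB_absorb (l : List Int) :
    ((decide (5 ≤ l.length) && (l.take 5).all (fun y => decide (0 ≤ y))) || pvGoB l) = pvGoB l := by
  cases l with
  | nil => simp [pvGoB]
  | cons x xs => rw [pvGoB_cons, Bool.or_self_left]

theorem take_sub_take {l : List Int} {j k : Nat} (h : j ≤ k) : l.take j ⊆ l.take k := by
  have : (l.take k).take j = l.take j := by rw [List.take_take, Nat.min_eq_left h]
  rw [← this]
  exact List.take_subset _ _

-- invariant: with k = 5 - c "still needed", A's loop is B's scan plus a prefix test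
theorem pvGoA_eq (l : List Int) : ∀ (k : Nat), 1 ≤ k → k ≤ 5 →
    pvGoA l (5 - (k : Int)) =
      ((decide (k ≤ l.length) && (l.take k).all (fun y => decide (0 ≤ y))) || pvGoB l) := by
  induction l with
  | nil =>
    intro k hk1 hk5
    simp [pvGoA, pvGoB]
    omega
  | cons x xs ih =>
    intro k hk1 hk5
    by_cases hx : 0 ≤ x
    · by_cases hk : k = 1
      · subst hk
        have hL : pvGoA (x :: xs) (5 - ((1 : Nat) : Int)) = true := by
          simp only [pvGoA, if_pos hx]
          norm_num
        rw [hL, pvGoB_cons]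
        simp
        exact Or.inl hx
      · have hc' : (5 - (k : Int)) + 1 = 5 - ((k - 1 : Nat) : Int) := by
          push_cast [Nat.cast_sub hk1]; ring
        have hne : ¬ ((5 : Int) - ((k - 1 : Nat) : Int) = 5) := by omega
        have step : pvGoA (x :: xs) (5 - (k : Int)) = pvGoA xs (5 - ((k - 1 : Nat) : Int)) := by
          simp only [pvGoA, if_pos hx, hc']
          rw [if_neg hne]
        rw [step, ih (k - 1) (by omega) (by omega), pvGoB_cons]
        have htk : (x :: xs).take k = x :: xs.take (k - 1) := by
          cases k with
          | zero => omega
          | succ n => simp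
        have ht5 : (x :: xs).take 5 = x :: xs.take 4 := by simp
        rw [Bool.eq_iff_iff]
        simp only [Bool.or_eq_true, Bool.and_eq_true, decide_eq_true_eq, List.all_eq_true,
          htk, ht5, List.forall_mem_cons, List.length_cons]
        constructor
        · rintro (⟨hlen, hall⟩ | hB)
          · exact Or.inl ⟨by omega, hx, hall⟩
          · exact Or.inr (Or.inr hB)
        · rintro (⟨hlen, _, hall⟩ | ⟨hlen, _, hall4⟩ | hB)
          · exact Or.inl ⟨by omega, hall⟩
          · refine Or.inl ⟨by omega, ?_⟩
            intro y hy
            exact hall4 y (take_sub_take (by omega) hy)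
          · exact Or.inr hB
    · -- reset: counter becomes 0 = 5 - 5; prefix tests are false since x < 0
      have step : pvGoA (x :: xs) (5 - (k : Int)) = pvGoA xs (5 - ((5 : Nat) : Int)) := by
        simp only [pvGoA, if_neg hx]
        norm_num
      rw [step, ih 5 (by omega) (by omega), pvGoB_cons]
      have htk : (x :: xs).take k = x :: xs.take (k - 1) := by
        cases k with
        | zero => omega
        | succ n => simp
      have hpk : ((x :: xs).take k).all (fun y => decide (0 ≤ y)) = false := by
        rw [htk]; simp [hx]
      have hp5 : ((x :: xs).take 5).all (fun y => decide (0 ≤ y)) = false := by simp [hx]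
      rw [hpk, hp5]
      simp only [Bool.and_false, Bool.false_or]
      exact pvGoB_absorb xs

-- ===== VERDICT (by name: the statement is the Claim_ definition above) =====
theorem cinqPositifsConsecutifs_spec : Claim_equal_cinqPositifsConsecutifs := by
  intro l _
  show cinqPositifsConsecutifs l = cinqPositifsConsecutifs_alt l
  unfold cinqPositifsConsecutifs cinqPositifsConsecutifs_alt
  have h := pvGoA_eq l 5 (by omega) (by omega)
  norm_num at h
  rw [h, pvGoB_absorb]
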